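-- pv_equiv track=rewrite | github.com/lwgray/seneca | src/api/conversation_api.py | _calculate_agent_activity
-- ===== SOURCE A (Python) =====
-- from typing import Any, Dict, List, Optional
--
-- def _calculate_agent_activity(conversations: List[Dict]) -> Dict[str, Any]:
--     """Calculate activity metrics per agent"""
--     agent_metrics = {}
--
--     for conv in conversations:
--         source = conv.get("source")
--         if source and source.startswith("agent"):
--             if source not in agent_metrics:
--                 agent_metrics[source] = {
--                     "messages_sent": 0,
--                     "tasks_requested": 0,
--                     "progress_reports": 0,
--                     "blockers_reported": 0
--                 }
--
--             agent_metrics[source]["messages_sent"] += 1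
--
--             conv_type = conv.get("type", "")
--             if "request" in conv_type:
--                 agent_metrics[source]["tasks_requested"] += 1
--             elif "progress" in conv_type:
--                 agent_metrics[source]["progress_reports"] += 1
--             elif "blocker" in conv_type:
--                 agent_metrics[source]["blockers_reported"] += 1
--
--     return agent_metrics
-- ===== SOURCE B (Python) =====
-- from typing import Any, Dict, List, Optional
--
-- def _classify(conv_type):
--     if "request" in conv_type:
--         return 1
--     if "progress" in conv_type:
--         return 2
--     if "blocker" in conv_type:
--         return 3
--     return 0
--
-- def _calculate_agent_activity(conversations: List[Dict]) -> Dict[str, Any]: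
--     """Calculate activity metrics per agent"""
--     groups = {}
--     for conv in conversations:
--         source = conv.get("source")
--         if source and source.startswith("agent"):
--             groups.setdefault(source, []).append(conv)
--
--     result = {}
--     for source, convs in groups.items():
--         cats = [_classify(c.get("type", "")) for c in convs]
--         result[source] = {
--             "messages_sent": len(convs),
--             "tasks_requested": cats.count(1),
--             "progress_reports": cats.count(2),
--             "blockers_reported": cats.count(3),
--         }
--     return result
-- ===== Notes on version B (the rewrite author's own statement) =====
-- stated objective: alternative
-- what changed: A updates a dict-of-dicts in one interleaved loop (create-on-first-sight, then increment counters per message); B first buckets agent conversations by source into a dict of lists preserving first-seen order, then builds each agent's four-metric dict in one per-group counting pass (messages = group size, categories classified once per conversation and tallied).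
import Mathlib
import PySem

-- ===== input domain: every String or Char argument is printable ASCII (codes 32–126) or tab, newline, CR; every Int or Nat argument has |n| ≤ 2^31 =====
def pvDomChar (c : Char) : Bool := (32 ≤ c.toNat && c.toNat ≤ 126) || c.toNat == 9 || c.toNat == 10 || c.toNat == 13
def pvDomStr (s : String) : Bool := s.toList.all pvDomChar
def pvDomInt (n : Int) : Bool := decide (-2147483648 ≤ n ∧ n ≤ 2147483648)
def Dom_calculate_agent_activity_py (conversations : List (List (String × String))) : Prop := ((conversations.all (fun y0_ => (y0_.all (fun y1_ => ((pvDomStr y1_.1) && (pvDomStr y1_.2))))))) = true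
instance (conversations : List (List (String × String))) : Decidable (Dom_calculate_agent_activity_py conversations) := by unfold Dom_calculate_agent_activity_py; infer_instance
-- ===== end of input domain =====

-- B replaces A's single interleaved dict-of-dicts update loop by a group-by-source pass followed
-- by per-group counting (messages = group size, categories tallied from a classification list);
-- objective: alternative decomposition, same asymptotic cost.

-- ===== PORT A =====
-- the fresh per-agent metrics dict A creates on first sight of a source
def pvInitMetrics : PySem.Dict String Int :=
  PySem.Dict.mk [("messages_sent", 0), ("tasks_requested", 0),
                 ("progress_reports", 0), ("blockers_reported", 0)]

-- body of A's `for conv in conversations` loop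
def pvAStep (d : PySem.Dict String (PySem.Dict String Int)) (conv : List (String × String)) :
    PySem.Dict String (PySem.Dict String Int) :=
  match (PySem.Dict.mk conv).get? "source" with
  | none => d
  | some source =>
    if (!(source == "")) && PySem.Str.startswith source "agent" then
      let d1 := if d.contains source then d else d.insert source pvInitMetrics
      let m1 := (d1.getD source pvInitMetrics).modify "messages_sent" 0 (· + 1)
      let t := (PySem.Dict.mk conv).getD "type" ""
      let m2 :=
        if PySem.Str.isIn "request" t then m1.modify "tasks_requested" 0 (· + 1)
        else if PySem.Str.isIn "progress" t then m1.modify "progress_reports" 0 (· + 1)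
        else if PySem.Str.isIn "blocker" t then m1.modify "blockers_reported" 0 (· + 1)
        else m1
      d1.insert source m2
    else d

def calculate_agent_activity_py (conversations : List (List (String × String))) :
    List (String × List (String × Int)) :=
  ((conversations.foldl pvAStep PySem.Dict.empty).items).map (fun p => (p.1, p.2.items))

-- ===== PORT B =====
-- B's classifier: the category (1 = request, 2 = progress, 3 = blocker, 0 = other) of a type string
def pvClassify (conv_type : String) : Int :=
  if PySem.Str.isIn "request" conv_type then 1
  else if PySem.Str.isIn "progress" conv_type then 2
  else if PySem.Str.isIn "blocker" conv_type then 3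
  else 0

-- body of B's grouping loop: groups.setdefault(source, []).append(conv)
def pvGroupStep (g : PySem.Dict String (List (List (String × String)))) (conv : List (String × String)) :
    PySem.Dict String (List (List (String × String))) :=
  match (PySem.Dict.mk conv).get? "source" with
  | none => g
  | some source =>
    if (!(source == "")) && PySem.Str.startswith source "agent" then
      g.modify source [] (· ++ [conv])
    else g

-- B's per-group metrics dict
def pvMetrics (convs : List (List (String × String))) : PySem.Dict String Int :=
  let cats := convs.map (fun c => pvClassify ((PySem.Dict.mk c).getD "type" ""))
  PySem.Dict.mk [("messages_sent", (convs.length : Int)),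
                 ("tasks_requested", (cats.count 1 : Int)),
                 ("progress_reports", (cats.count 2 : Int)),
                 ("blockers_reported", (cats.count 3 : Int))]

def calculate_agent_activity_py_alt (conversations : List (List (String × String))) :
    List (String × List (String × Int)) :=
  let groups := conversations.foldl pvGroupStep PySem.Dict.empty
  let result := groups.items.foldl (fun r p => r.insert p.1 (pvMetrics p.2)) PySem.Dict.empty
  result.items.map (fun p => (p.1, p.2.items))

-- ===== PRECONDITION & SPEC =====
def Spec_calculate_agent_activity_py (conversations : List (List (String × String))) (out : List (String × List (String × Int))) : Prop := out = calculate_agent_activity_py_alt conversations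
instance (conversations : List (List (String × String))) (out : List (String × List (String × Int))) : Decidable (Spec_calculate_agent_activity_py conversations out) := by unfold Spec_calculate_agent_activity_py; infer_instance

-- ===== CLAIM (what is proved, stated in full; the proofs are below) =====
def Claim_equal_calculate_agent_activity_py : Prop := ∀ (conversations : List (List (String × String))), Dom_calculate_agent_activity_py conversations → Spec_calculate_agent_activity_py conversations (calculate_agent_activity_py conversations)

-- ===== LEMMAS AND PROOFS =====

-- modifying one of the four literal metric keys just bumps that component
lemma pvmod_ms (a b c d : Int) :
    (PySem.Dict.mk [("messages_sent", a), ("tasks_requested", b),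
                    ("progress_reports", c), ("blockers_reported", d)]).modify "messages_sent" 0 (· + 1)
    = PySem.Dict.mk [("messages_sent", a + 1), ("tasks_requested", b),
                     ("progress_reports", c), ("blockers_reported", d)] := rfl

lemma pvmod_tr (a b c d : Int) :
    (PySem.Dict.mk [("messages_sent", a), ("tasks_requested", b),
                    ("progress_reports", c), ("blockers_reported", d)]).modify "tasks_requested" 0 (· + 1)
    = PySem.Dict.mk [("messages_sent", a), ("tasks_requested", b + 1),
                     ("progress_reports", c), ("blockers_reported", d)] := rfl

lemma pvmod_pr (a b c d : Int) :
    (PySem.Dict.mk [("messages_sent", a), ("tasks_requested", b),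
                    ("progress_reports", c), ("blockers_reported", d)]).modify "progress_reports" 0 (· + 1)
    = PySem.Dict.mk [("messages_sent", a), ("tasks_requested", b),
                     ("progress_reports", c + 1), ("blockers_reported", d)] := rfl

lemma pvmod_br (a b c d : Int) :
    (PySem.Dict.mk [("messages_sent", a), ("tasks_requested", b),
                    ("progress_reports", c), ("blockers_reported", d)]).modify "blockers_reported" 0 (· + 1)
    = PySem.Dict.mk [("messages_sent", a), ("tasks_requested", b),
                     ("progress_reports", c), ("blockers_reported", d + 1)] := rfl

-- A's inner-dict update of the metrics of cs, run on one more conv, is B's metrics of cs ++ [conv]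
lemma pvMetrics_step (cs : List (List (String × String))) (conv : List (String × String)) :
    (if PySem.Str.isIn "request" ((PySem.Dict.mk conv).getD "type" "") then
       ((pvMetrics cs).modify "messages_sent" 0 (· + 1)).modify "tasks_requested" 0 (· + 1)
     else if PySem.Str.isIn "progress" ((PySem.Dict.mk conv).getD "type" "") then
       ((pvMetrics cs).modify "messages_sent" 0 (· + 1)).modify "progress_reports" 0 (· + 1)
     else if PySem.Str.isIn "blocker" ((PySem.Dict.mk conv).getD "type" "") then
       ((pvMetrics cs).modify "messages_sent" 0 (· + 1)).modify "blockers_reported" 0 (· + 1)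
     else (pvMetrics cs).modify "messages_sent" 0 (· + 1))
    = pvMetrics (cs ++ [conv]) := by
  generalize ht : (PySem.Dict.mk conv).getD "type" "" = t
  simp only [pvMetrics, List.map_append, List.map_cons, List.map_nil, ht]
  cases h1 : PySem.Str.isIn "request" t <;>
    cases h2 : PySem.Str.isIn "progress" t <;>
      cases h3 : PySem.Str.isIn "blocker" t <;>
  simp at h1 h2 h3 <;>
  simp [pvClassify, h1, h2, h3, pvmod_ms, pvmod_tr, pvmod_pr, pvmod_br,
        List.count_append, List.count_nil, List.length_append]

lemma pvMetrics_nil : pvMetrics [] = pvInitMetrics := by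
  simp [pvMetrics, pvInitMetrics]

-- the abstraction map from a group of conversations to A's metrics entry
def pvF (p : String × List (List (String × String))) : String × PySem.Dict String Int :=
  (p.1, pvMetrics p.2)

lemma pvStep_nodup (g : PySem.Dict String (List (List (String × String)))) (conv : List (String × String))
    (hk : g.keys.Nodup) : (pvGroupStep g conv).keys.Nodup := by
  unfold pvGroupStep
  cases (PySem.Dict.mk conv).get? "source" with
  | none => exact hk
  | some s =>
    show (if (!(s == "")) && PySem.Str.startswith s "agent" then
            g.modify s [] (· ++ [conv]) else g).keys.Nodup
    by_cases hc : ((!(s == "")) && PySem.Str.startswith s "agent") = true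
    · rw [if_pos hc]
      rw [show g.modify s [] (· ++ [conv]) = g.insert s (g.getD s [] ++ [conv]) from rfl]
      exact PySem.Dict.nodup_keys_insert g s _ hk
    · rw [if_neg hc]; exact hk

lemma pvStep_items (g : PySem.Dict String (List (List (String × String))))
    (d : PySem.Dict String (PySem.Dict String Int)) (conv : List (String × String))
    (hk : g.keys.Nodup) (hd : d.items = g.items.map pvF) :
    (pvAStep d conv).items = (pvGroupStep g conv).items.map pvF := by
  unfold pvAStep pvGroupStep
  cases (PySem.Dict.mk conv).get? "source" with
  | none => exact hd
  | some s =>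
    show (if (!(s == "")) && PySem.Str.startswith s "agent" then
            (if d.contains s then d else d.insert s pvInitMetrics).insert s
              (if PySem.Str.isIn "request" ((PySem.Dict.mk conv).getD "type" "") then
                 (((if d.contains s then d else d.insert s pvInitMetrics).getD s pvInitMetrics).modify
                     "messages_sent" 0 (· + 1)).modify "tasks_requested" 0 (· + 1)
               else if PySem.Str.isIn "progress" ((PySem.Dict.mk conv).getD "type" "") then
                 (((if d.contains s then d else d.insert s pvInitMetrics).getD s pvInitMetrics).modify
                     "messages_sent" 0 (· + 1)).modify "progress_reports" 0 (· + 1)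
               else if PySem.Str.isIn "blocker" ((PySem.Dict.mk conv).getD "type" "") then
                 (((if d.contains s then d else d.insert s pvInitMetrics).getD s pvInitMetrics).modify
                     "messages_sent" 0 (· + 1)).modify "blockers_reported" 0 (· + 1)
               else ((if d.contains s then d else d.insert s pvInitMetrics).getD s pvInitMetrics).modify
                     "messages_sent" 0 (· + 1))
          else d).items
        = (if (!(s == "")) && PySem.Str.startswith s "agent" then
            g.modify s [] (· ++ [conv]) else g).items.map pvF
    by_cases hc : ((!(s == "")) && PySem.Str.startswith s "agent") = true
    · rw [if_pos hc, if_pos hc]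
      have hkeys : d.keys = g.keys := by
        simp only [PySem.Dict.keys, hd, List.map_map]; rfl
      have hcont : d.contains s = g.contains s := by
        rw [PySem.Dict.contains_eq_decide_mem_keys, PySem.Dict.contains_eq_decide_mem_keys, hkeys]
      have hmod : g.modify s [] (· ++ [conv]) = g.insert s (g.getD s [] ++ [conv]) := rfl
      by_cases hgc : g.contains s = true
      · -- source already seen: both sides overwrite the existing entry in place
        have hdc : d.contains s = true := by rw [hcont]; exact hgc
        have hgetd : d.getD s pvInitMetrics = pvMetrics (g.getD s []) := by
          have hmemg : (s, g.getD s []) ∈ g.items := by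
            cases hq : g.get? s with
            | none =>
              have hco := PySem.Dict.contains_eq_isSome_get? g s
              rw [hq] at hco; simp [hco] at hgc
            | some v =>
              have hv : g.getD s [] = v := by
                rw [PySem.Dict.getD_eq_get?_getD, hq]; rfl
              rw [hv]
              exact (PySem.Dict.get?_eq_some_iff_mem_items g s v hk).mp hq
          have hmemd : (s, pvMetrics (g.getD s [])) ∈ d.items := by
            rw [hd]; exact List.mem_map_of_mem hmemg
          exact PySem.Dict.getD_of_mem_items d hmemd (hkeys ▸ hk) _
        simp only [if_pos hdc]
        rw [hgetd, pvMetrics_step (g.getD s []) conv, hmod,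
            PySem.Dict.items_insert_of_contains d _ hdc,
            PySem.Dict.items_insert_of_contains g _ hgc,
            hd, List.map_map, List.map_map]
        apply List.map_congr_left
        intro p _
        by_cases hps : (p.1 == s) = true
        · simp [pvF, Function.comp, hps]
        · simp [pvF, Function.comp, hps]
      · -- first sight of source: both sides append a fresh entry
        have hgc' : g.contains s = false := by
          cases h : g.contains s
          · rfl
          · exact absurd h hgc
        have hdc : ¬ d.contains s = true := by rw [hcont]; exact hgc
        simp only [if_neg hdc]
        rw [PySem.Dict.getD_insert_self, show pvInitMetrics = pvMetrics [] from pvMetrics_nil.symm,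
            pvMetrics_step [] conv, List.nil_append,
            PySem.Dict.insert_insert_self,
            PySem.Dict.items_insert_of_not_contains d _ (by simpa using hdc),
            hmod, PySem.Dict.getD_of_not_contains g [] hgc', List.nil_append,
            PySem.Dict.items_insert_of_not_contains g _ hgc',
            hd, List.map_append]
        rfl
    · rw [if_neg hc, if_neg hc]; exact hd

lemma pvLoop (convs : List (List (String × String))) :
    ∀ (g : PySem.Dict String (List (List (String × String))))
      (d : PySem.Dict String (PySem.Dict String Int)),
      g.keys.Nodup → d.items = g.items.map pvF →
      (convs.foldl pvAStep d).items = (convs.foldl pvGroupStep g).items.map pvF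
      ∧ (convs.foldl pvGroupStep g).keys.Nodup := by
  induction convs with
  | nil => intro g d hk hd; exact ⟨hd, hk⟩
  | cons conv rest ih =>
    intro g d hk hd
    simp only [List.foldl_cons]
    exact ih _ _ (pvStep_nodup g conv hk) (pvStep_items g d conv hk hd)

-- ===== VERDICT (by name: the statement is the Claim_ definition above) =====
theorem calculate_agent_activity_py_spec : Claim_equal_calculate_agent_activity_py := by
  intro conversations _hdom
  unfold Spec_calculate_agent_activity_py
  obtain ⟨hitems, hnodup⟩ :=
    pvLoop conversations PySem.Dict.empty PySem.Dict.empty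
      PySem.Dict.nodup_keys_empty (by rfl)
  have halt : calculate_agent_activity_py_alt conversations =
      (((conversations.foldl pvGroupStep PySem.Dict.empty).items.foldl
        (fun r p => r.insert p.1 (pvMetrics p.2)) PySem.Dict.empty).items).map
        (fun p => (p.1, p.2.items)) := rfl
  have hfresh : (((conversations.foldl pvGroupStep PySem.Dict.empty).items.foldl
      (fun r p => r.insert p.1 (pvMetrics p.2)) PySem.Dict.empty).items)
      = (conversations.foldl pvGroupStep PySem.Dict.empty).items.map (fun p => (p.1, pvMetrics p.2)) := by
    have h := PySem.Dict.items_foldl_insert_fresh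
      ((conversations.foldl pvGroupStep PySem.Dict.empty).items)
      (fun p => p.1) (fun p => pvMetrics p.2) PySem.Dict.empty
      (by intro a _; simp [PySem.Dict.contains_empty])
      (by simpa [PySem.Dict.keys] using hnodup)
    simpa using h
  rw [halt, hfresh]
  show ((conversations.foldl pvAStep PySem.Dict.empty).items).map (fun p => (p.1, p.2.items)) = _
  rw [hitems, List.map_map, List.map_map]
  apply List.map_congr_left
  intro p _
  simp [pvF, Function.comp]
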